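-- pv_equiv track=rewrite | github.com/ameer886/Interview-practice | affirm/most_letter_or_shopping_pattern.py | max_pattern
-- ===== SOURCE A (Python) =====
-- def max_pattern(words):
--     letter_pattern_count = {}
--     for word in words:
--         for i, let_1 in enumerate(word):
--             if let_1 not in letter_pattern_count.keys():
--                 letter_pattern_count[let_1] = {}
--
--             for j, let_2 in enumerate(word):
--                 if i == j:
--                     continue
--
--                 letter_pattern_count[let_1][let_2] = letter_pattern_count[let_1].get(let_2, 0) + 1
--
--     result = {}
--     for letter, count_map in letter_pattern_count.items():
--         max_count = 0
--         l = []
--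
--         for let, cnt in count_map.items():
--             if cnt > max_count:
--                 l = []
--                 max_count = cnt
--
--             if cnt == max_count:
--                 l.append(let)
--
--
--         result[letter] = l
--     return result
-- ===== SOURCE B (Python) =====
-- def max_pattern(words):
--     # Per word: one frequency pass, then per position add whole per-letter counts
--     # (freq[b], minus one for the letter itself) instead of A's inner +1 scan.
--     counts = {}
--     for word in words:
--         freq = {}
--         for ch in word:
--             freq[ch] = freq.get(ch, 0) + 1
--         for i, a in enumerate(word):
--             inner = counts.setdefault(a, {})
--             others = word[:i] + word[i + 1:]
--             for b in dict.fromkeys(others):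
--                 inner[b] = inner.get(b, 0) + freq[b] - (1 if b == a else 0)
--     result = {}
--     for letter, cmap in counts.items():
--         m = max(cmap.values(), default=0)
--         result[letter] = [b for b, c in cmap.items() if c == m]
--     return result
-- ===== Notes on version B (the rewrite author's own statement) =====
-- stated objective: alternative
-- what changed: B computes a per-word letter-frequency table once and, at each position, adds whole per-letter counts (freq[b], minus one for the letter itself) over the distinct remaining letters instead of A's inner +1 scan over every position, and extracts each result row by max-then-filter instead of A's running-max-with-reset loop.
import Mathlib
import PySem

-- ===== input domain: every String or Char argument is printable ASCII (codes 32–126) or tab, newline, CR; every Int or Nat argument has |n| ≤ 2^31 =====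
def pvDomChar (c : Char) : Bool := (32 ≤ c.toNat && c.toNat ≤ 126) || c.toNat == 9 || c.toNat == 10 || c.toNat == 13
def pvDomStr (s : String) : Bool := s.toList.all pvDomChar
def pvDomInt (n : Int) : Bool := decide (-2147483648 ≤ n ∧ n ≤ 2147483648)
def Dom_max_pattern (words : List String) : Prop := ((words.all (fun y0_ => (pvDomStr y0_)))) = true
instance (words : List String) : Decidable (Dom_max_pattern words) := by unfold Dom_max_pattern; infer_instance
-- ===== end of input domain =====

-- B replaces A's inner per-position +1 scan by bulk adds of per-letter counts taken from a
-- per-word frequency table, and the running-max/reset extraction by max-then-filter.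

-- ===== PORT A =====
-- inner 'for j, let_2 in enumerate(word): if i == j: continue; lpc[let_1][let_2] = lpc[let_1].get(let_2,0)+1'
def pvA_inner (w : List Char) (i : Int) (a : Char)
    (d : PySem.Dict Char (PySem.Dict Char Int)) : PySem.Dict Char (PySem.Dict Char Int) :=
  (PySem.List.enumerate w).foldl
    (fun d jw => if i = jw.1 then d
      else d.modify a PySem.Dict.empty (fun m => m.modify jw.2 0 (· + 1))) d

-- body of 'for word in words'
def pvA_word (d : PySem.Dict Char (PySem.Dict Char Int)) (word : String) :
    PySem.Dict Char (PySem.Dict Char Int) :=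
  (PySem.List.enumerate word.toList).foldl
    (fun d ia => pvA_inner word.toList ia.1 ia.2
      (if d.contains ia.2 then d else d.insert ia.2 PySem.Dict.empty)) d

-- 'max_count = 0; l = []; for let, cnt in count_map.items(): …'
def pvA_best (cmap : PySem.Dict Char Int) : List Char :=
  (cmap.items.foldl
    (fun (st : Int × List Char) q =>
      let st := if st.1 < q.2 then (q.2, ([] : List Char)) else st
      if q.2 == st.1 then (st.1, st.2 ++ [q.1]) else st) (0, ([] : List Char))).2

def max_pattern (words : List String) : List (String × List String) :=
  (words.foldl pvA_word PySem.Dict.empty).items.map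
    (fun p => (String.singleton p.1, (pvA_best p.2).map String.singleton))

-- ===== PORT B =====
-- body of Source B's 'for word in words' (freq pass, then per position bulk adds over distinct others)
def pvB_word (d : PySem.Dict Char (PySem.Dict Char Int)) (word : String) :
    PySem.Dict Char (PySem.Dict Char Int) :=
  let w := word.toList
  let freq := w.foldl (fun f ch => f.insert ch (f.getD ch 0 + 1)) PySem.Dict.empty
  (PySem.List.enumerate w).foldl
    (fun d ia =>
      let d1 := d.setdefault ia.2 PySem.Dict.empty
      -- others = word[:i] + word[i+1:]; exact via take/drop since 0 ≤ i < len(word)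
      let others := w.take ia.1.toNat ++ w.drop (ia.1.toNat + 1)
      d1.insert ia.2
        ((PySem.List.dedup others).foldl
           (fun m b => m.insert b (m.getD b 0 + freq.getD b 0 - (if b == ia.2 then 1 else 0)))
           (d1.getD ia.2 PySem.Dict.empty))) d

def max_pattern_alt (words : List String) : List (String × List String) :=
  (words.foldl pvB_word PySem.Dict.empty).items.map
    (fun p =>
      let m := PySem.List.maxD p.2.values (fun x => x) 0
      (String.singleton p.1, ((p.2.items.filter (fun q => q.2 == m)).map (·.1)).map String.singleton))

-- ===== PRECONDITION & SPEC =====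
def Spec_max_pattern (words : List String) (out : List (String × List String)) : Prop := out = max_pattern_alt words
instance (words : List String) (out : List (String × List String)) : Decidable (Spec_max_pattern words out) := by unfold Spec_max_pattern; infer_instance

-- ===== CLAIM (what is proved, stated in full; the proofs are below) =====
def Claim_equal_max_pattern : Prop := ∀ (words : List String), Dom_max_pattern words → Spec_max_pattern words (max_pattern words)

-- ===== LEMMAS AND PROOFS =====

lemma pv_mem_enumerate : ∀ (w : List Char) (s : Int) (ia : Int × Char),
    ia ∈ PySem.List.enumerate w s → ∃ n : Nat, w[n]? = some ia.2 ∧ ia.1 = s + n := by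
  intro w
  induction w with
  | nil => intro s ia h; simp [PySem.List.enumerate] at h
  | cons x t ih =>
    intro s ia h
    rw [PySem.List.enumerate_cons] at h
    rcases List.mem_cons.mp h with h | h
    · exact ⟨0, by subst h; simp⟩
    · obtain ⟨n, h1, h2⟩ := ih (s + 1) ia h
      exact ⟨n + 1, by simpa using h1, by omega⟩

lemma pv_foldSkip_lt {β : Type} (g : β → Char → β) :
    ∀ (w : List Char) (s i : Int), i < s → ∀ d : β,
    (PySem.List.enumerate w s).foldl (fun d jw => if i = jw.1 then d else g d jw.2) d
      = w.foldl g d := by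
  intro w
  induction w with
  | nil => intro s i h d; simp [PySem.List.enumerate]
  | cons x t ih =>
    intro s i h d
    rw [PySem.List.enumerate_cons]
    simp only [List.foldl_cons]
    rw [if_neg (by omega)]
    exact ih (s + 1) i (by omega) (g d x)

lemma pv_foldSkip {β : Type} (g : β → Char → β) :
    ∀ (w : List Char) (n : Nat) (s : Int) (d : β), n < w.length →
    (PySem.List.enumerate w s).foldl (fun d jw => if s + (n : Int) = jw.1 then d else g d jw.2) d
      = (w.take n ++ w.drop (n + 1)).foldl g d := by
  intro w
  induction w with
  | nil => intro n s d h; simp at h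
  | cons x t ih =>
    intro n s d h
    rw [PySem.List.enumerate_cons]
    simp only [List.foldl_cons]
    cases n with
    | zero =>
      rw [if_pos (by omega)]
      simpa using pv_foldSkip_lt g t (s + 1) (s + 0) (by omega) d
    | succ m =>
      rw [if_neg (by omega)]
      have harg : ∀ jw : Int × Char, (s + ((m + 1 : Nat) : Int) = jw.1) = ((s + 1) + (m : Int) = jw.1) := by
        intro jw; congr 1; push_cast; ring
      simp only [harg]
      have := ih m (s + 1) (g d x) (by simpa using h)
      simpa using this

lemma pv_count_split : ∀ (w : List Char) (n : Nat) (a b : Char), w[n]? = some a →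
    w.count b = (w.take n ++ w.drop (n + 1)).count b + (if b = a then 1 else 0) := by
  intro w n a b h
  have hn : n < w.length := by
    by_contra hc
    rw [List.getElem?_eq_none (by omega)] at h
    simp at h
  have ha : w[n] = a := by
    have := List.getElem?_eq_getElem hn
    rw [this] at h; exact Option.some.inj h
  conv_lhs => rw [← List.take_append_drop n w, ← List.getElem_cons_drop hn]
  simp [List.count_append, List.count_cons, ha]
  by_cases hba : b = a <;> simp [hba]
  · omega
  · exact fun hh => hba hh.symm

lemma pv_mem_update_right {x : Char} : ∀ (t : List Char) (s : PySem.Set Char),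
    x ∈ s → x ∈ PySem.Set.update s t := by
  intro t
  induction t with
  | nil => intro s h; exact h
  | cons y t ih =>
    intro s h
    exact ih (s.add y) ((PySem.Set.mem_add s y x).mpr (Or.inl h))

lemma pv_mem_update {x : Char} : ∀ (t : List Char) (s : PySem.Set Char),
    x ∈ t → x ∈ PySem.Set.update s t := by
  intro t
  induction t with
  | nil => intro s h; simp at h
  | cons y t ih =>
    intro s h
    rcases List.mem_cons.mp h with h | h
    · exact pv_mem_update_right t (s.add y) ((PySem.Set.mem_add s y x).mpr (Or.inr h))
    · exact ih (s.add y) h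

lemma pv_update_add (s t : PySem.Set Char) (x : Char) :
    PySem.Set.update s (PySem.Set.add t x) = PySem.Set.add (PySem.Set.update s t) x := by
  by_cases hc : PySem.Set.contains t x = true
  · have h1 : PySem.Set.add t x = t := by unfold PySem.Set.add; rw [if_pos hc]
    have hx : x ∈ PySem.Set.update s t :=
      pv_mem_update t s (List.contains_iff_mem.mp hc)
    have h2 : PySem.Set.add (PySem.Set.update s t) x = PySem.Set.update s t := by
      unfold PySem.Set.add
      rw [if_pos (show PySem.Set.contains (PySem.Set.update s t) x = true from
        List.contains_iff_mem.mpr hx)]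
    rw [h1, h2]
  · have h1 : PySem.Set.add t x = t ++ [x] := by unfold PySem.Set.add; rw [if_neg hc]
    rw [h1]
    unfold PySem.Set.update
    rw [List.foldl_append]
    rfl

lemma pv_update_update : ∀ (l : List Char) (s t : PySem.Set Char),
    PySem.Set.update s (PySem.Set.update t l) = PySem.Set.update (PySem.Set.update s t) l := by
  intro l
  induction l with
  | nil => intro s t; rfl
  | cons x l ih =>
    intro s t
    show PySem.Set.update s (PySem.Set.update (t.add x) l) = _
    rw [ih s (t.add x), pv_update_add]
    rfl

lemma pv_update_dedup (s : PySem.Set Char) (l : List Char) :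
    PySem.Set.update s (PySem.List.dedup l) = PySem.Set.update s l := by
  have : PySem.List.dedup l = PySem.Set.update [] l := rfl
  rw [this, pv_update_update]
  rfl

lemma pv_getD_foldl_insert_nodup (c : Char → Int) :
    ∀ (ks : List Char), ks.Nodup → ∀ (m : PySem.Dict Char Int) (v : Char),
    (ks.foldl (fun m b => m.insert b (m.getD b 0 + c b)) m).getD v 0
      = m.getD v 0 + (if v ∈ ks then c v else 0) := by
  intro ks
  induction ks with
  | nil => intro _ m v; simp
  | cons k ks ih =>
    intro hnd m v
    simp only [List.foldl_cons]
    rw [ih (List.nodup_cons.mp hnd).2]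
    by_cases hv : v = k
    · subst hv
      rw [PySem.Dict.getD_insert_self]
      have : v ∉ ks := (List.nodup_cons.mp hnd).1
      simp [this]
    · rw [PySem.Dict.getD_insert_of_ne _ _ _ hv]
      simp [hv, List.mem_cons]

lemma pv_insert_getD_self {κ ν : Type} [BEq κ] [LawfulBEq κ]
    (d : PySem.Dict κ ν) (k : κ) (dflt : ν)
    (hc : d.contains k = true) (hnd : d.keys.Nodup) :
    d.insert k (d.getD k dflt) = d := by
  apply PySem.Dict.ext
  rw [PySem.Dict.items_insert_of_contains _ _ hc]
  conv_rhs => rw [← List.map_id d.items]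
  apply List.map_congr_left
  intro p hp
  by_cases hpk : p.1 == k
  · have hpk' : p.1 = k := eq_of_beq hpk
    have : d.get? p.1 = some p.2 := PySem.Dict.get?_of_mem_items d (by simpa using hp) hnd
    have hgd : d.getD k dflt = p.2 := by
      rw [PySem.Dict.getD_eq_get?_getD, ← hpk', this]; rfl
    rw [if_pos hpk, hgd]
    simp only [id]
    rw [← hpk']
  · simp [hpk]

lemma pv_foldl_modify_collapse (g : PySem.Dict Char Int → Char → PySem.Dict Char Int) :
    ∀ (l : List Char) (d : PySem.Dict Char (PySem.Dict Char Int)) (k : Char),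
    d.contains k = true → d.keys.Nodup →
    l.foldl (fun d b => d.insert k (g (d.getD k PySem.Dict.empty) b)) d
      = d.insert k (l.foldl g (d.getD k PySem.Dict.empty)) := by
  intro l
  induction l with
  | nil => intro d k hc hnd; exact (pv_insert_getD_self d k _ hc hnd).symm
  | cons b l ih =>
    intro d k hc hnd
    simp only [List.foldl_cons]
    rw [ih (d.insert k (g (d.getD k PySem.Dict.empty) b)) k
         (by rw [PySem.Dict.contains_insert]; simp)
         (PySem.Dict.nodup_keys_insert d k _ hnd)]
    rw [PySem.Dict.getD_insert_self, PySem.Dict.insert_insert_self]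

lemma pv_grouped_counter (l : List Char) (m : PySem.Dict Char Int) (hnd : m.keys.Nodup) :
    l.foldl (fun m b => m.modify b 0 (· + 1)) m
      = (PySem.List.dedup l).foldl
          (fun m b => m.insert b (m.getD b 0 + (l.count b : Int))) m := by
  have hnd1 : (l.foldl (fun m b => m.modify b 0 (· + 1)) m).keys.Nodup :=
    PySem.Dict.nodup_keys_foldl_modify_key l (fun b => b) 0 (fun _ _ => (· + 1)) m hnd
  have hnd2 : ((PySem.List.dedup l).foldl
      (fun m b => m.insert b (m.getD b 0 + (l.count b : Int))) m).keys.Nodup :=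
    PySem.Dict.nodup_keys_foldl_insert _ (fun m b => m.getD b 0 + (l.count b : Int)) m hnd
  apply PySem.Dict.ext
  rw [PySem.Dict.items_eq_map_keys _ hnd1 0, PySem.Dict.items_eq_map_keys _ hnd2 0]
  rw [PySem.Dict.keys_foldl_modify l 0 (fun _ _ => (· + 1)) m,
      PySem.Dict.keys_foldl_insert (PySem.List.dedup l) (fun m b => m.getD b 0 + (l.count b : Int)) m,
      pv_update_dedup]
  apply List.map_congr_left
  intro k _
  have h1 := PySem.Dict.getD_foldl_modify_add_one l m k
  have h2 := pv_getD_foldl_insert_nodup (fun b => (l.count b : Int)) (PySem.List.dedup l)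
    (PySem.Set.nodup_ofList l) m k
  rw [h1, h2]
  by_cases hk : k ∈ PySem.List.dedup l
  · simp only [if_pos hk]
  · have hnl : k ∉ l := fun h => hk ((PySem.Set.mem_ofList l k).mpr h)
    simp [List.count_eq_zero_of_not_mem hnl]

lemma pv_phase2_fold : ∀ (xs : List (Char × Int)) (m0 : Int) (l0 : List Char),
    xs.foldl
      (fun (st : Int × List Char) q =>
        let st := if st.1 < q.2 then (q.2, ([] : List Char)) else st
        if q.2 == st.1 then (st.1, st.2 ++ [q.1]) else st) (m0, l0)
    = (xs.foldl (fun m q => max m q.2) m0,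
       (if xs.foldl (fun m q => max m q.2) m0 = m0 then l0 else [])
         ++ (xs.filter (fun q => q.2 == xs.foldl (fun m q => max m q.2) m0)).map (·.1)) := by
  intro xs
  induction xs with
  | nil => intro m0 l0; simp
  | cons q xs ih =>
    intro m0 l0
    rcases lt_trichotomy m0 q.2 with hlt | heq | hgt
    · have hstep : (let st := if (m0, l0).1 < q.2 then (q.2, ([] : List Char)) else (m0, l0)
          if q.2 == st.1 then (st.1, st.2 ++ [q.1]) else st) = (q.2, [q.1]) := by
        simp [hlt]
      rw [List.foldl_cons, hstep, ih]
      simp only [List.foldl_cons, List.filter_cons]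
      have hm : max m0 q.2 = q.2 := max_eq_right hlt.le
      simp only [hm]
      have hle := (PySem.List.le_foldl_max_int xs (fun q => q.2) q.2).1
      have hne : xs.foldl (fun m q => max m q.2) q.2 ≠ m0 := by omega
      rw [if_neg hne]
      by_cases hq : List.foldl (fun m q => max m q.2) q.2 xs = q.2
      · rw [if_pos hq, if_pos (beq_iff_eq.mpr hq.symm)]
        simp
      · rw [if_neg hq, if_neg (by simpa using fun h => hq h.symm)]
    · have hstep : (let st := if (m0, l0).1 < q.2 then (q.2, ([] : List Char)) else (m0, l0)
          if q.2 == st.1 then (st.1, st.2 ++ [q.1]) else st) = (m0, l0 ++ [q.1]) := by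
        simp [heq]
      rw [List.foldl_cons, hstep, ih]
      simp only [List.foldl_cons, List.filter_cons]
      have hm : max m0 q.2 = m0 := by omega
      simp only [hm]
      by_cases hf : xs.foldl (fun m q => max m q.2) m0 = m0
      · have hq2 : q.2 = m0 := heq.symm
        simp [hf, hq2]
      · have hne : q.2 ≠ xs.foldl (fun m q => max m q.2) m0 := by omega
        simp [hf, hne, beq_iff_eq]
    · have hstep : (let st := if (m0, l0).1 < q.2 then (q.2, ([] : List Char)) else (m0, l0)
          if q.2 == st.1 then (st.1, st.2 ++ [q.1]) else st) = (m0, l0) := by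
        have h1 : ¬ m0 < q.2 := by omega
        have h2 : ¬ q.2 = m0 := by omega
        simp [h1, h2]
      rw [List.foldl_cons, hstep, ih]
      simp only [List.foldl_cons, List.filter_cons]
      have hm : max m0 q.2 = m0 := by omega
      simp only [hm]
      have hle := (PySem.List.le_foldl_max_int xs (fun q => q.2) m0).1
      have : q.2 ≠ xs.foldl (fun m q => max m q.2) m0 := by omega
      simp [this, beq_iff_eq]

lemma pv_best_eq (cmap : PySem.Dict Char Int) (hv : ∀ q ∈ cmap.items, (0 : Int) ≤ q.2) :
    (cmap.items.foldl
      (fun (st : Int × List Char) q =>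
        let st := if st.1 < q.2 then (q.2, ([] : List Char)) else st
        if q.2 == st.1 then (st.1, st.2 ++ [q.1]) else st) (0, ([] : List Char))).2
      = (cmap.items.filter
          (fun q => q.2 == PySem.List.maxD cmap.values (fun x => x) 0)).map (·.1) := by
  rw [pv_phase2_fold]
  have hmaxD : PySem.List.maxD cmap.values (fun x => x) 0
      = cmap.items.foldl (fun m q => max m q.2) 0 := by
    have hvals : cmap.values = cmap.items.map (·.2) := rfl
    cases hit : cmap.items with
    | nil => simp [PySem.List.maxD, PySem.List.max?, hvals, hit]
    | cons q rest =>
      have h0 : (0 : Int) ≤ q.2 := hv q (by rw [hit]; exact List.mem_cons_self)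
      rw [hvals, hit]
      simp only [List.map_cons, List.foldl_cons]
      rw [PySem.List.maxD, PySem.List.max?_id_cons, List.foldl_map]
      have : max 0 q.2 = q.2 := max_eq_right h0
      rw [this]
      rfl
  rw [hmaxD]
  simp

lemma pv_foldl_congr_inv {β γ : Type} (P : β → Prop) :
    ∀ (l : List γ) (f g : β → γ → β) (b : β), P b →
    (∀ b x, x ∈ l → P b → f b x = g b x ∧ P (f b x)) →
    l.foldl f b = l.foldl g b ∧ P (l.foldl f b) := by
  intro l
  induction l with
  | nil => intro f g b hb _; exact ⟨rfl, hb⟩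
  | cons x l ih =>
    intro f g b hb hstep
    obtain ⟨heq, hP⟩ := hstep b x List.mem_cons_self hb
    simp only [List.foldl_cons]
    obtain ⟨h1, h2⟩ := ih f g (f b x) hP (fun b y hy => hstep b y (List.mem_cons_of_mem x hy))
    exact ⟨by rw [← heq] at *; rw [h1], h2⟩

def pvInv (d : PySem.Dict Char (PySem.Dict Char Int)) : Prop :=
  d.keys.Nodup ∧ ∀ a : Char, (d.getD a PySem.Dict.empty).keys.Nodup ∧
    ∀ k : Char, 0 ≤ (d.getD a PySem.Dict.empty).getD k 0

lemma pv_setdefault_eq (d : PySem.Dict Char (PySem.Dict Char Int)) (k : Char) :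
    d.setdefault k PySem.Dict.empty
      = if d.contains k then d else d.insert k PySem.Dict.empty := by
  by_cases hc : d.contains k = true
  · simp [PySem.Dict.setdefault, PySem.Dict.insert, hc]
  · simp only [Bool.not_eq_true] at hc
    simp [PySem.Dict.setdefault, PySem.Dict.insert, hc]

lemma pv_pos_step (w : List Char) (freq : PySem.Dict Char Int)
    (hfreq : ∀ b, freq.getD b 0 = (w.count b : Int)) :
    ∀ (d : PySem.Dict Char (PySem.Dict Char Int)) (ia : Int × Char),
    ia ∈ PySem.List.enumerate w 0 → pvInv d →
    (pvA_inner w ia.1 ia.2 (if d.contains ia.2 then d else d.insert ia.2 PySem.Dict.empty)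
      = (d.setdefault ia.2 PySem.Dict.empty).insert ia.2
          ((PySem.List.dedup (w.take ia.1.toNat ++ w.drop (ia.1.toNat + 1))).foldl
             (fun m b => m.insert b (m.getD b 0 + freq.getD b 0 - (if b == ia.2 then 1 else 0)))
             ((d.setdefault ia.2 PySem.Dict.empty).getD ia.2 PySem.Dict.empty)))
    ∧ pvInv (pvA_inner w ia.1 ia.2 (if d.contains ia.2 then d else d.insert ia.2 PySem.Dict.empty)) := by
  intro d ia hmem hinv
  obtain ⟨n, hw, hia⟩ := pv_mem_enumerate w 0 ia hmem
  obtain ⟨hn, hval⟩ := List.getElem?_eq_some_iff.mp hw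
  set a := ia.2 with ha
  set d1 := if d.contains a then d else d.insert a PySem.Dict.empty with hd1
  have hsd : d.setdefault a PySem.Dict.empty = d1 := pv_setdefault_eq d a
  have hc1 : d1.contains a = true := by
    rw [hd1]
    by_cases hc : d.contains a = true
    · rw [if_pos hc]; exact hc
    · rw [if_neg hc, PySem.Dict.contains_insert]; simp
  have hnd1 : d1.keys.Nodup := by
    rw [hd1]
    by_cases hc : d.contains a = true
    · rw [if_pos hc]; exact hinv.1
    · rw [if_neg hc]; exact PySem.Dict.nodup_keys_insert d a _ hinv.1
  have hgetD1 : ∀ x : Char, d1.getD x PySem.Dict.empty = d.getD x PySem.Dict.empty := by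
    intro x
    rw [hd1]
    by_cases hc : d.contains a = true
    · rw [if_pos hc]
    · rw [if_neg hc]
      by_cases hx : x = a
      · subst hx
        rw [PySem.Dict.getD_insert_self,
            PySem.Dict.getD_of_not_contains d _ (by simpa using hc)]
      · exact PySem.Dict.getD_insert_of_ne d _ _ hx
  set inner0 := d1.getD a PySem.Dict.empty with hi0
  have hi0nd : inner0.keys.Nodup := by rw [hi0, hgetD1]; exact (hinv.2 a).1
  set others := w.take n ++ w.drop (n + 1) with ho
  have htoNat : ia.1.toNat = n := by omega
  have hg : others.foldl (fun m b => m.insert b (m.getD b 0 + 1)) inner0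
      = (PySem.List.dedup others).foldl
          (fun m b => m.insert b (m.getD b 0 + (others.count b : Int))) inner0 := by
    have hgc := pv_grouped_counter others inner0 hi0nd
    simp only [PySem.Dict.modify] at hgc
    exact hgc
  -- A side reduction
  have hA : pvA_inner w ia.1 a d1
      = d1.insert a ((PySem.List.dedup others).foldl
          (fun m b => m.insert b (m.getD b 0 + (others.count b : Int))) inner0) := by
    unfold pvA_inner
    rw [show ia.1 = 0 + (n : Int) by omega]
    rw [pv_foldSkip (fun d b => d.modify a PySem.Dict.empty (fun m => m.modify b 0 (· + 1)))
          w n 0 d1 hn]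
    simp only [PySem.Dict.modify]
    rw [pv_foldl_modify_collapse (fun m b => m.insert b (m.getD b 0 + 1)) others d1 a hc1 hnd1]
    rw [← hi0, hg]
  -- B side body equals the same
  have hB : (PySem.List.dedup others).foldl
        (fun m b => m.insert b (m.getD b 0 + freq.getD b 0 - (if b == a then 1 else 0))) inner0
      = (PySem.List.dedup others).foldl
        (fun m b => m.insert b (m.getD b 0 + (others.count b : Int))) inner0 := by
    apply PySem.List.foldl_congr_mem
    intro m b _
    congr 1
    have hcnt := pv_count_split w n a b hw
    rw [hfreq b]
    by_cases hba : b = a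
    · rw [if_pos (beq_iff_eq.mpr hba)]
      rw [if_pos hba] at hcnt
      have : (w.count b : Int) = (others.count b : Int) + 1 := by exact_mod_cast hcnt
      rw [this]; ring
    · rw [if_neg (by simpa using hba)]
      rw [if_neg hba] at hcnt
      have : (w.count b : Int) = (others.count b : Int) := by exact_mod_cast hcnt
      rw [this]; ring
  constructor
  · rw [hA, hsd, ← hi0, htoNat, ← ho, hB]
  · rw [hA]
    refine ⟨PySem.Dict.nodup_keys_insert _ _ _ hnd1, ?_⟩
    intro a'
    by_cases ha' : a' = a
    · subst ha'
      rw [PySem.Dict.getD_insert_self]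
      refine ⟨PySem.Dict.nodup_keys_foldl_insert _ _ _ hi0nd, ?_⟩
      intro k
      rw [← hg, PySem.Dict.getD_foldl_insert_add_one]
      have h0 : 0 ≤ inner0.getD k 0 := by rw [hi0, hgetD1]; exact (hinv.2 a).2 k
      positivity
    · rw [PySem.Dict.getD_insert_of_ne _ _ _ ha', hgetD1]
      exact hinv.2 a'

lemma pv_word_step : ∀ (d : PySem.Dict Char (PySem.Dict Char Int)) (word : String),
    pvInv d → pvA_word d word = pvB_word d word ∧ pvInv (pvA_word d word) := by
  intro d word hinv
  unfold pvA_word pvB_word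
  have hfreq : ∀ b : Char, (word.toList.foldl
      (fun f ch => f.insert ch (f.getD ch 0 + 1)) PySem.Dict.empty).getD b 0
      = (word.toList.count b : Int) := by
    intro b
    rw [PySem.Dict.getD_foldl_insert_add_one]
    simp
  exact pv_foldl_congr_inv pvInv (PySem.List.enumerate word.toList 0) _ _ d hinv
    (fun d ia hmem hP => pv_pos_step word.toList _ hfreq d ia hmem hP)

lemma pv_inv_empty : pvInv PySem.Dict.empty := by
  refine ⟨by simp, fun a => ?_⟩
  rw [PySem.Dict.getD_empty]
  exact ⟨by simp, fun k => by rw [PySem.Dict.getD_empty]⟩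

theorem pv_main (words : List String) : max_pattern words = max_pattern_alt words := by
  unfold max_pattern max_pattern_alt
  obtain ⟨hEq, hInv⟩ := pv_foldl_congr_inv pvInv words pvA_word pvB_word PySem.Dict.empty
    pv_inv_empty (fun d w _ hP => pv_word_step d w hP)
  rw [← hEq]
  apply List.map_congr_left
  intro p hp
  have hget : (words.foldl pvA_word PySem.Dict.empty).getD p.1 PySem.Dict.empty = p.2 := by
    have h1 : (words.foldl pvA_word PySem.Dict.empty).get? p.1 = some p.2 :=
      PySem.Dict.get?_of_mem_items _ (by simpa using hp) hInv.1
    rw [PySem.Dict.getD_eq_get?_getD, h1]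
    rfl
  have hnd : p.2.keys.Nodup := by rw [← hget]; exact (hInv.2 p.1).1
  have hpos : ∀ q ∈ p.2.items, (0 : Int) ≤ q.2 := by
    intro q hq
    have h1 : p.2.get? q.1 = some q.2 :=
      PySem.Dict.get?_of_mem_items _ (by simpa using hq) hnd
    have h2 : p.2.getD q.1 0 = q.2 := by
      rw [PySem.Dict.getD_eq_get?_getD, h1]; rfl
    rw [← h2, ← hget]
    exact (hInv.2 p.1).2 q.1
  have := pv_best_eq p.2 hpos
  unfold pvA_best
  rw [this]

-- ===== VERDICT (by name: the statement is the Claim_ definition above) =====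
theorem max_pattern_spec : Claim_equal_max_pattern := by
  intro words _
  unfold Spec_max_pattern
  exact pv_main words
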